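-- pv_equiv track=rewrite | github.com/juchengquan/Algorithm_Apprentice | push_in_stack.py | get_what
-- ===== SOURCE A (Python) =====
-- def get_what(a):
--     p = []
--     while len(a) > 0:
--         idx = a.index(min(a))
--         a.pop(idx)
--         p.append(idx)
--
--     for n in range(len(p)-1):
--         if p[n] != 0:
--             if p[n] <= p[n+1]:
--                 return False
--
--     return True
-- ===== SOURCE B (Python) =====
-- def get_what(a):
--     n = len(a)
--     order = sorted(range(n), key=lambda i: (a[i], i))
--     c = [sum(1 for j in range(i) if a[j] > a[i]) for i in range(n)]
--     p = [c[i] for i in order]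
--     return all(x == 0 or x > y for x, y in zip(p, p[1:]))
-- ===== Notes on version B (the rewrite author's own statement) =====
-- stated objective: alternative
-- what changed: B replaces A's destructive loop of repeated min/index/pop on a shrinking list by one stable argsort plus per-element left-greater counts (the recorded index of each removal equals the number of strictly greater elements to its left), and checks adjacent pairs with zip; B does not mutate its argument while A empties it.
import Mathlib
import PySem

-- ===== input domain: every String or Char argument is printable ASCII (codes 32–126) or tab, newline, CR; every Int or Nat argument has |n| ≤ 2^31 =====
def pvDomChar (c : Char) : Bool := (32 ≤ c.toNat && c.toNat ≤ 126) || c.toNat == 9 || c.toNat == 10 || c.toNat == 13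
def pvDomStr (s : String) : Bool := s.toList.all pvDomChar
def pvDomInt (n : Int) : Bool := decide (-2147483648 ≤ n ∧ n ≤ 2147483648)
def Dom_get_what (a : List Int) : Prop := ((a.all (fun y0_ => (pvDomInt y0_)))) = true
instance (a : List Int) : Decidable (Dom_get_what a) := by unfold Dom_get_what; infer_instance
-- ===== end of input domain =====

-- B replaces A's destructive repeated-min-extraction loop by one stable argsort plus
-- left-greater counts (alternative algorithm, similar cost); A empties its argument list
-- in place while B does not mutate it — the equivalence proved here is about the return value.

-- ===== PORT A =====
-- while len(a) > 0: idx = a.index(min(a)); a.pop(idx); p.append(idx)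
-- (fuel = initial length; each iteration pops one element, so the fuel guard is exact)
def getWhatLoopA : Nat → List Int → List Int → List Int
  | 0, _, p => p
  | fuel+1, a, p =>
    if a.length = 0 then p
    else
      match PySem.List.min? a (fun x => x) with
      | none => p
      | some m =>
        match PySem.List.index? a m with
        | none => p
        | some idx =>
          match PySem.List.pop? a (idx : Int) with
          | none => p
          | some r => getWhatLoopA fuel r.2 (p ++ [(idx : Int)])

-- for n in range(len(p)-1): if p[n] != 0: if p[n] <= p[n+1]: return False   / return True
-- (the index loop visits exactly the adjacent pairs of p, in order)
def getWhatCheckA : List Int → Bool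
  | x :: y :: t => if x ≠ 0 then (if x ≤ y then false else getWhatCheckA (y :: t)) else getWhatCheckA (y :: t)
  | _ => true

def get_what (a : List Int) : Bool := getWhatCheckA (getWhatLoopA a.length a [])

-- ===== PORT B =====
def get_what_alt (a : List Int) : Bool :=
  let n : Int := (a.length : Int)
  let order : List Int := PySem.List.sorted2 (PySem.List.pyRange 0 n 1)
    (fun i => PySem.List.pyGetD a i 0) (fun i => i)
  -- sum(1 for j in range(i) if a[j] > a[i]) is the count of j in range(i) with a[j] > a[i]
  let c : List Int := (PySem.List.pyRange 0 n 1).map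
    (fun i => ((PySem.List.pyRange 0 i 1).countP
      (fun j => decide (PySem.List.pyGetD a i 0 < PySem.List.pyGetD a j 0)) : Int))
  let p : List Int := order.map (fun i => PySem.List.pyGetD c i 0)
  (p.zip (PySem.List.slice p (some 1) none)).all (fun xy => xy.1 == 0 || decide (xy.2 < xy.1))

-- ===== PRECONDITION & SPEC =====
def Spec_get_what (a : List Int) (out : Bool) : Prop := out = get_what_alt a
instance (a : List Int) (out : Bool) : Decidable (Spec_get_what a out) := by unfold Spec_get_what; infer_instance

-- ===== CLAIM (what is proved, stated in full; the proofs are below) =====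
def Claim_equal_get_what : Prop := ∀ (a : List Int), Dom_get_what a → Spec_get_what a (get_what a)

-- ===== LEMMAS AND PROOFS =====

-- spec-level notions (Nat indices)
def cntN (a : List Int) (k : Nat) : Nat := (a.take k).countP (fun y => decide (a.getD k 0 < y))

def ordN (a : List Int) : List Nat :=
  PySem.List.sorted2 (List.range a.length) (fun i => a.getD i 0) (fun i => i)

def lexR (a : List Int) (i j : Nat) : Prop :=
  a.getD i 0 < a.getD j 0 ∨ (a.getD i 0 = a.getD j 0 ∧ i < j)

def shiftIdx (idx j : Nat) : Nat := if idx ≤ j then j + 1 else j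

-- insertion sort transport along a map
theorem insertBy_map {α β : Type} (f : α → β) (bef : β → β → Bool) (bef' : α → α → Bool)
    (h : ∀ u v, bef (f u) (f v) = bef' u v) (x : α) (l : List α) :
    PySem.List.insertBy bef (f x) (l.map f) = (PySem.List.insertBy bef' x l).map f := by
  induction l with
  | nil => simp [PySem.List.insertBy]
  | cons y ys ih =>
    simp only [List.map_cons, PySem.List.insertBy, h]
    split <;> simp [ih]

theorem foldl_insertBy_map {α β : Type} (f : α → β) (bef : β → β → Bool) (bef' : α → α → Bool)
    (h : ∀ u v, bef (f u) (f v) = bef' u v) (xs acc : List α) :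
    (xs.map f).foldl (fun r x => PySem.List.insertBy bef x r) (acc.map f)
      = (xs.foldl (fun r x => PySem.List.insertBy bef' x r) acc).map f := by
  induction xs generalizing acc with
  | nil => rfl
  | cons x xs ih =>
    simp only [List.map_cons, List.foldl_cons, insertBy_map f bef bef' h]
    exact ih _

-- B's order equals ordN mapped into Int
theorem orderB_eq (a : List Int) :
    PySem.List.sorted2 (PySem.List.pyRange 0 (a.length : Int) 1)
      (fun i => PySem.List.pyGetD a i 0) (fun i => i)
      = (ordN a).map (fun i : Nat => (i : Int)) := by
  rw [PySem.List.pyRange_zero_natCast a.length]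
  unfold ordN PySem.List.sorted2
  simp only [if_neg (by decide : ¬ (false = true))]
  refine foldl_insertBy_map (fun i : Nat => (i : Int)) _ _ ?_ (List.range a.length) []
  intro u v
  simp

-- sorted2 as sorted with the lexicographic key
theorem sorted2_eq_lex {α : Type} (xs : List α) (k1 : α → Int) (k2 : α → Nat) :
    PySem.List.sorted2 xs k1 k2 = PySem.List.sorted xs (fun x => toLex (k1 x, k2 x)) := by
  unfold PySem.List.sorted2 PySem.List.sorted
  simp only [if_neg (by decide : ¬ (false = true))]
  have hbe : (fun (a b : α) => (decide (k1 a < k1 b) || (!decide (k1 b < k1 a) && decide (k2 a < k2 b))))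
      = (fun (a b : α) => decide ((fun x => toLex (k1 x, k2 x)) a < (fun x => toLex (k1 x, k2 x)) b)) := by
    funext u v
    simp only [Prod.Lex.lt_iff]
    rcases lt_trichotomy (k1 u) (k1 v) with h | h | h
    · simp [h]
    · simp [h]
    · have h1 : ¬ k1 u < k1 v := lt_asymm h
      have h2 : k1 u ≠ k1 v := h.ne'
      simp [h, h1, h2]
  rw [hbe]

theorem sorted2_unique {α : Type} (xs ys : List α) (k1 : α → Int) (k2 : α → Nat)
    (hp : ys.Perm xs)
    (hpw : ys.Pairwise (fun u v => k1 u < k1 v ∨ (k1 u = k1 v ∧ k2 u < k2 v))) :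
    PySem.List.sorted2 xs k1 k2 = ys := by
  rw [sorted2_eq_lex]
  refine @PySem.List.sorted_eq_of_perm_of_pairwise_lt α (Lex (Int × Nat)) _ xs ys (fun x => toLex (k1 x, k2 x)) hp ?_
  refine hpw.imp ?_
  intro u v huv
  rw [Prod.Lex.lt_iff]
  exact huv

theorem ordN_perm (a : List Int) : (ordN a).Perm (List.range a.length) := by
  unfold ordN
  rw [sorted2_eq_lex]
  exact PySem.List.sorted_perm (List.range a.length) (fun i => toLex (a.getD i 0, i)) false

theorem ordN_lt {a : List Int} {i : Nat} (h : i ∈ ordN a) : i < a.length := by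
  have := (ordN_perm a).mem_iff.1 h
  simpa using this

theorem ordN_pairwise (a : List Int) : (ordN a).Pairwise (lexR a) := by
  have hnd : (ordN a).Nodup := (ordN_perm a).nodup_iff.2 (List.nodup_range)
  have hpw : (ordN a).Pairwise (fun i j => (toLex (a.getD i 0, i)) ≤ (toLex (a.getD j 0, j))) := by
    unfold ordN
    rw [sorted2_eq_lex]
    exact PySem.List.sorted_pairwise (List.range a.length) (fun i => toLex (a.getD i 0, i))
  refine (hnd.and hpw).imp ?_
  rintro i j ⟨hne, hle⟩
  have hlt : (toLex (a.getD i 0, i)) < (toLex (a.getD j 0, j)) := by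
    refine lt_of_le_of_ne hle ?_
    intro hcontra
    apply hne
    have := congrArg (fun x => (ofLex x).2) hcontra
    simpa using this
  rw [Prod.Lex.lt_iff] at hlt
  exact hlt

theorem countP_range_take (a : List Int) (x : Int) (k : Nat) (hk : k ≤ a.length) :
    (List.range k).countP (fun j => decide (x < a.getD j 0))
      = (a.take k).countP (fun y => decide (x < y)) := by
  induction k with
  | zero => simp
  | succ k ih =>
    have hk' : k < a.length := hk
    rw [List.range_succ, List.countP_append, ih (le_of_lt hk'), List.take_add_one]
    have : a[k]? = some a[k] := List.getElem?_eq_getElem hk'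
    rw [List.countP_append, this]
    simp [List.getD_eq_getElem?_getD, this]

theorem eraseIdx_append_cons (l1 l2 : List Int) (x : Int) :
    (l1 ++ x :: l2).eraseIdx l1.length = l1 ++ l2 := by
  induction l1 with
  | nil => simp
  | cons a t ih => simp [ih]

-- min facts
theorem foldl_min_mem (t : List Int) (x : Int) : t.foldl min x ∈ x :: t := by
  induction t generalizing x with
  | nil => simp
  | cons y ys ih =>
    have := ih (min x y)
    rcases List.mem_cons.1 this with h | h
    · rcases min_choice x y with hc | hc <;> rw [List.foldl_cons, h, hc] <;> simp
    · simp [List.foldl_cons, h]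

theorem foldl_min_le (t : List Int) (x : Int) : ∀ y ∈ x :: t, t.foldl min x ≤ y := by
  induction t generalizing x with
  | nil => simp
  | cons z zs ih =>
    intro y hy
    have hle : zs.foldl min (min x z) ≤ min x z := ih (min x z) _ (List.mem_cons_self)
    rcases List.mem_cons.1 hy with h | h
    · subst h; exact le_trans hle (min_le_left _ _)
    · rcases List.mem_cons.1 h with h2 | h2
      · subst h2; exact le_trans hle (min_le_right _ _)
      · exact ih (min x z) _ (List.mem_cons_of_mem _ h2)

theorem getD_shift (pre suf : List Int) (m : Int) (j : Nat) :
    (pre ++ m :: suf).getD (shiftIdx pre.length j) 0 = (pre ++ suf).getD j 0 := by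
  unfold shiftIdx
  by_cases hle : pre.length ≤ j
  · rw [if_pos hle, List.getD_append_right _ _ _ _ (by omega), List.getD_append_right _ _ _ _ hle]
    have h1 : j + 1 - pre.length = (j - pre.length) + 1 := by omega
    rw [h1]
    simp
  · rw [if_neg hle, List.getD_append _ _ _ _ (by omega), List.getD_append _ _ _ _ (by omega)]

-- step lemmas, phrased with the decomposition a = pre ++ m :: suf, m ∉ pre, m minimal
theorem cnt_at_idx (pre suf : List Int) (m : Int)
    (hmin : ∀ y ∈ pre ++ m :: suf, m ≤ y) (hnot : m ∉ pre) :
    cntN (pre ++ m :: suf) pre.length = pre.length := by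
  unfold cntN
  rw [List.take_left]
  have hget : (pre ++ m :: suf).getD pre.length 0 = m := by
    rw [List.getD_append_right _ _ _ _ (le_refl _)]
    simp
  rw [hget]
  rw [List.countP_eq_length.2]
  intro y hy
  have h1 : m ≤ y := hmin y (by simp [hy])
  have h2 : y ≠ m := fun h => hnot (h ▸ hy)
  simp [lt_of_le_of_ne h1 (Ne.symm h2)]

theorem cnt_shift (pre suf : List Int) (m : Int)
    (hmin : ∀ y ∈ pre ++ m :: suf, m ≤ y)
    (j : Nat) (hj : j < pre.length + suf.length) :
    cntN (pre ++ m :: suf) (shiftIdx pre.length j) = cntN (pre ++ suf) j := by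
  unfold cntN shiftIdx
  by_cases hle : pre.length ≤ j
  · rw [if_pos hle]
    have hgs : (pre ++ m :: suf).getD (j + 1) 0 = suf.getD (j - pre.length) 0 := by
      rw [List.getD_append_right _ _ _ _ (by omega)]
      have : j + 1 - pre.length = (j - pre.length) + 1 := by omega
      rw [this]
      simp
    have hgs' : (pre ++ suf).getD j 0 = suf.getD (j - pre.length) 0 :=
      List.getD_append_right _ _ _ _ hle
    rw [hgs, hgs']
    have ht1 : (pre ++ m :: suf).take (j + 1) = pre ++ m :: suf.take (j - pre.length) := by
      rw [List.take_append, List.take_of_length_le (by omega)]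
      have : j + 1 - pre.length = (j - pre.length) + 1 := by omega
      rw [this]
      simp
    have ht2 : (pre ++ suf).take j = pre ++ suf.take (j - pre.length) := by
      rw [List.take_append, List.take_of_length_le hle]
    rw [ht1, ht2, List.countP_append, List.countP_append, List.countP_cons]
    have hmem : suf.getD (j - pre.length) 0 ∈ pre ++ m :: suf := by
      have hjl : j - pre.length < suf.length := by omega
      have : suf.getD (j - pre.length) 0 = suf[j - pre.length] := List.getD_eq_getElem _ _ hjl
      rw [this]
      exact List.mem_append_right _ (List.mem_cons_of_mem _ (List.getElem_mem hjl))
    have hnot2 : ¬ (suf[j - pre.length]?.getD 0 < m) := by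
      have := not_lt.2 (hmin _ hmem)
      simpa [List.getD] using this
    simp [hnot2]
  · rw [if_neg hle]
    have hlt : j < pre.length := by omega
    have hg1 : (pre ++ m :: suf).getD j 0 = pre.getD j 0 := List.getD_append _ _ _ _ hlt
    have hg2 : (pre ++ suf).getD j 0 = pre.getD j 0 := List.getD_append _ _ _ _ hlt
    rw [hg1, hg2, List.take_append_of_le_length (le_of_lt hlt),
      List.take_append_of_le_length (le_of_lt hlt)]

theorem ord_step (pre suf : List Int) (m : Int)
    (hmin : ∀ y ∈ pre ++ m :: suf, m ≤ y) (hnot : m ∉ pre) :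
    ordN (pre ++ m :: suf) = pre.length :: (ordN (pre ++ suf)).map (shiftIdx pre.length) := by
  have hidxget : (pre ++ m :: suf).getD pre.length 0 = m := by
    rw [List.getD_append_right _ _ _ _ (le_refl _)]
    simp
  have hlenA : (pre ++ m :: suf).length = pre.length + suf.length + 1 := by simp; omega
  have hlenA' : (pre ++ suf).length = pre.length + suf.length := by simp
  show PySem.List.sorted2 (List.range (pre ++ m :: suf).length) _ _ = _
  refine sorted2_unique _ _ _ _ ?_ ?_
  · -- permutation
    have hperm1 : ((ordN (pre ++ suf)).map (shiftIdx pre.length)).Perm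
        ((List.range (pre.length + suf.length)).map (shiftIdx pre.length)) := by
      refine List.Perm.map _ ?_
      have := ordN_perm (pre ++ suf)
      rwa [hlenA'] at this
    have hmapr : (List.range (pre.length + suf.length)).map (shiftIdx pre.length)
        = List.range' 0 pre.length ++ List.range' (pre.length + 1) suf.length := by
      rw [List.range_eq_range']
      have hsplit : List.range' 0 (pre.length + suf.length)
          = List.range' 0 pre.length ++ List.range' pre.length suf.length := by
        have := @List.range'_append 0 pre.length suf.length 1
        simpa using this.symm
      rw [hsplit, List.map_append]
      congr 1
      · have hid : ∀ j ∈ List.range' 0 pre.length, shiftIdx pre.length j = j := by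
          intro j hj
          have := List.mem_range'_1.1 hj
          unfold shiftIdx
          rw [if_neg (by omega)]
        rw [List.map_congr_left hid, List.map_id']
      · have hsucc : ∀ j ∈ List.range' pre.length suf.length, shiftIdx pre.length j = 1 + j := by
          intro j hj
          have := List.mem_range'_1.1 hj
          unfold shiftIdx
          rw [if_pos (by omega)]
          omega
        rw [List.map_congr_left hsucc, List.map_add_range', Nat.add_comm 1 pre.length]
    have hrange : List.range (pre ++ m :: suf).length
        = List.range' 0 pre.length ++ pre.length :: List.range' (pre.length + 1) suf.length := by
      rw [hlenA, List.range_eq_range']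
      have hsplit : List.range' 0 (pre.length + suf.length + 1)
          = List.range' 0 pre.length ++ List.range' pre.length (suf.length + 1) := by
        have := @List.range'_append 0 pre.length (suf.length + 1) 1
        have h2 : pre.length + (suf.length + 1) = pre.length + suf.length + 1 := by omega
        rw [h2] at this
        simpa using this.symm
      rw [hsplit, List.range'_succ]
    have step1 : ((ordN (pre ++ suf)).map (shiftIdx pre.length)).Perm
        (List.range' 0 pre.length ++ List.range' (pre.length + 1) suf.length) := by
      rw [← hmapr]
      exact hperm1
    have step2 : (pre.length :: (List.range' 0 pre.length ++ List.range' (pre.length + 1) suf.length)).Perm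
        (List.range (pre ++ m :: suf).length) := by
      rw [hrange]
      exact List.perm_middle.symm
    exact (step1.cons pre.length).trans step2
  · -- pairwise
    rw [List.pairwise_cons]
    constructor
    · intro b hb
      obtain ⟨j, hj, rfl⟩ := List.mem_map.1 hb
      have hjl : j < (pre ++ suf).length := ordN_lt hj
      have htr : (pre ++ m :: suf).getD (shiftIdx pre.length j) 0 = (pre ++ suf).getD j 0 :=
        getD_shift pre suf m j
      rw [hidxget, htr]
      by_cases hle : pre.length ≤ j
      · have hjs : j - pre.length < suf.length := by
          rw [hlenA'] at hjl
          omega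
        have hg : (pre ++ suf).getD j 0 = suf[j - pre.length] := by
          rw [List.getD_append_right _ _ _ _ hle]
          exact List.getD_eq_getElem _ _ hjs
        have hmle : m ≤ suf[j - pre.length] :=
          hmin _ (List.mem_append_right _ (List.mem_cons_of_mem _ (List.getElem_mem hjs)))
        rcases lt_or_eq_of_le hmle with hlt | heq
        · left
          rw [hg]
          exact hlt
        · right
          refine ⟨by rw [hg, ← heq], ?_⟩
          unfold shiftIdx
          rw [if_pos hle]
          omega
      · have hjp : j < pre.length := by omega
        have hg : (pre ++ suf).getD j 0 = pre[j] := by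
          rw [List.getD_append _ _ _ _ hjp]
          exact List.getD_eq_getElem _ _ hjp
        have hmem : pre[j] ∈ pre := List.getElem_mem hjp
        have hmle : m ≤ pre[j] := hmin _ (List.mem_append_left _ hmem)
        left
        rw [hg]
        exact lt_of_le_of_ne hmle (fun h => hnot (h ▸ hmem))
    · rw [List.pairwise_map]
      refine (ordN_pairwise (pre ++ suf)).imp_of_mem ?_
      intro i j hi hj hlex
      have hil : i < (pre ++ suf).length := ordN_lt hi
      have hjl : j < (pre ++ suf).length := ordN_lt hj
      have htri : (pre ++ m :: suf).getD (shiftIdx pre.length i) 0 = (pre ++ suf).getD i 0 :=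
        getD_shift pre suf m i
      have htrj : (pre ++ m :: suf).getD (shiftIdx pre.length j) 0 = (pre ++ suf).getD j 0 :=
        getD_shift pre suf m j
      rw [htri, htrj]
      rcases hlex with hlt | ⟨heq, hij⟩
      · exact Or.inl hlt
      · refine Or.inr ⟨heq, ?_⟩
        unfold shiftIdx
        split_ifs <;> omega

theorem ordN_nil : ordN [] = [] := by
  unfold ordN PySem.List.sorted2
  rfl

-- the loop computes the spec
theorem loopA_eq (fuel : Nat) : ∀ (a p : List Int), a.length ≤ fuel →
    getWhatLoopA fuel a p = p ++ (ordN a).map (fun i => (cntN a i : Int)) := by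
  induction fuel with
  | zero =>
    intro a p h
    have ha : a = [] := List.length_eq_zero_iff.1 (Nat.le_zero.1 h)
    subst ha
    simp [getWhatLoopA, ordN_nil]
  | succ fuel ih =>
    intro a p h
    by_cases ha : a.length = 0
    · have ha' : a = [] := List.length_eq_zero_iff.1 ha
      subst ha'
      simp [getWhatLoopA, ordN_nil]
    · obtain ⟨x, t, rfl⟩ : ∃ x t, a = x :: t := by
        cases a with
        | nil => simp at ha
        | cons x t => exact ⟨x, t, rfl⟩
      show (if (x :: t).length = 0 then p else _) = _
      rw [if_neg (by simp)]
      rw [PySem.List.min?_id_cons]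
      have hmem : t.foldl min x ∈ x :: t := foldl_min_mem t x
      have hmin : ∀ y ∈ x :: t, t.foldl min x ≤ y := foldl_min_le t x
      obtain ⟨k, hk⟩ : ∃ k, PySem.List.index? (x :: t) (t.foldl min x) = some k :=
        Option.isSome_iff_exists.1 ((PySem.List.index?_isSome_iff _ _).2 hmem)
      simp only [hk]
      obtain ⟨pre, suf, heq, hklen, hnot⟩ := (PySem.List.index?_eq_some_iff _ _ _).1 hk
      have hklt : k < (x :: t).length := by
        rw [heq, ← hklen]
        simp
      simp only [PySem.List.pop?_natCast _ k hklt]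
      show getWhatLoopA fuel ((x :: t).eraseIdx k) (p ++ [(k : Int)]) = _
      have hmin' : ∀ y ∈ pre ++ t.foldl min x :: suf, t.foldl min x ≤ y := by
        rw [← heq]; exact hmin
      have hlen' : (pre ++ suf).length ≤ fuel := by
        have h2 := congrArg List.length heq
        simp only [List.length_cons, List.length_append] at h2 h ⊢
        omega
      rw [heq, ← hklen, eraseIdx_append_cons, ih (pre ++ suf) _ hlen',
        ord_step pre suf (t.foldl min x) hmin' hnot]
      rw [List.map_cons, cnt_at_idx pre suf (t.foldl min x) hmin' hnot, List.map_map]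
      have hmap : (ordN (pre ++ suf)).map
            ((fun i => (cntN (pre ++ t.foldl min x :: suf) i : Int)) ∘ shiftIdx pre.length)
          = (ordN (pre ++ suf)).map (fun i => (cntN (pre ++ suf) i : Int)) := by
        refine List.map_congr_left ?_
        intro j hj
        have hjl : j < (pre ++ suf).length := ordN_lt hj
        simp only [Function.comp]
        rw [cnt_shift pre suf (t.foldl min x) hmin' j (by simpa using hjl)]
      rw [hmap]
      simp

-- check phase: A's early-return pair scan is B's zip-all
theorem check_eq (p : List Int) :
    getWhatCheckA p
      = (p.zip (p.drop 1)).all (fun xy => xy.1 == 0 || decide (xy.2 < xy.1)) := by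
  match p with
  | [] => rfl
  | [x] => rfl
  | x :: y :: t =>
    have ih := check_eq (y :: t)
    simp only [getWhatCheckA, List.drop_one, List.tail_cons, List.zip_cons_cons, List.all_cons, ih]
    by_cases hx : x = 0
    · simp [hx]
    · by_cases hxy : x ≤ y
      · simp [hx, hxy]
      · simp [hx, hxy]
        intro _
        omega

-- B's p equals the spec list
theorem pB_eq (a : List Int) :
    ((ordN a).map (fun i : Nat => (i : Int))).map
        (fun i => PySem.List.pyGetD
          ((PySem.List.pyRange 0 (a.length : Int) 1).map
            (fun i => ((PySem.List.pyRange 0 i 1).countP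
              (fun j => decide (PySem.List.pyGetD a i 0 < PySem.List.pyGetD a j 0)) : Int))) i 0)
      = (ordN a).map (fun i => (cntN a i : Int)) := by
  rw [List.map_map]
  refine List.map_congr_left ?_
  intro i hi
  have hlt := ordN_lt hi
  simp only [Function.comp]
  rw [PySem.List.pyGetD_map_pyRange_of_nonneg _ _ _ _ (by positivity) (by exact_mod_cast hlt)]
  rw [PySem.List.pyRange_zero_natCast i, List.countP_map]
  have hpred : ((fun j => decide (PySem.List.pyGetD a (i : Int) 0 < PySem.List.pyGetD a j 0))
        ∘ (fun k : Nat => (k : Int))) = (fun j : Nat => decide (a.getD i 0 < a.getD j 0)) := by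
    funext j
    simp
  rw [hpred, countP_range_take a _ i (le_of_lt hlt)]
  rfl

-- ===== VERDICT (by name: the statement is the Claim_ definition above) =====
theorem get_what_spec : Claim_equal_get_what := by
  intro a _
  show get_what a = get_what_alt a
  unfold get_what get_what_alt
  simp only []
  rw [loopA_eq a.length a [] (le_refl _), orderB_eq, pB_eq, check_eq,
    PySem.List.slice_from_one]
  simp [List.drop_one]
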